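-- pv_equiv track=rewrite | github.com/kaushik-42/Data_Science_Projects | ALGOEXPERT/b.py | binary_no
-- ===== SOURCE A (Python) =====
-- def binary_no(n):
--     m = ''
--     while n:
--         m += str(n % 2)
--         n >>= 1
--     if(len(m) % 2 == 0):
--         m = m[::-1]
--     else:
--         m = '0'+m[::-1]
--     m = list(m)
--     i = len(m)-1
--     while(i > 0):
--         m[i], m[i-1] = m[i-1], m[i]
--         i -= 2
--     return m
-- ===== SOURCE B (Python) =====
-- def binary_no(n):
--     groups = []
--     while n:
--         groups.append([str(n & 1), str((n >> 1) & 1)])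
--         n >>= 2
--     groups.reverse()
--     return [bit for group in groups for bit in group]
-- ===== Notes on version B (the rewrite author's own statement) =====
-- stated objective: simpler
-- what changed: Replaces A's four passes (build LSB-first string, reverse, pad to even length, in-place adjacent-pair index-swap loop) with one loop that extracts two bits per iteration, emitting each [lo, hi] group directly, then reverses the group list and flattens; padding and swapping fall out automatically.
import Mathlib
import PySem

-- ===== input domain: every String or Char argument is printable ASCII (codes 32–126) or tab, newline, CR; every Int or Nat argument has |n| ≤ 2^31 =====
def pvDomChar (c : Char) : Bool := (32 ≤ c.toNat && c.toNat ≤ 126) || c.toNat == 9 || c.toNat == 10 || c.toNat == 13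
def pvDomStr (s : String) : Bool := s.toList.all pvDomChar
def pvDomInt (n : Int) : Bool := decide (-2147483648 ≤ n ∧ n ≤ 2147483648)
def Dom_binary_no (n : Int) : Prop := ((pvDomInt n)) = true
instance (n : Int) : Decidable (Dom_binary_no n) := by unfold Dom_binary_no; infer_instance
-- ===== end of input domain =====

-- B replaces A's four passes (build LSB-first digit string, reverse, pad to even length,
-- in-place adjacent-pair swap loop) with a single loop that emits one [lo, hi] two-bit group
-- per iteration; objective: simpler.

-- ===== PORT A =====
-- `while n: m += str(n % 2); n >>= 1` — the fuel (n.toNat + 1 at the call site) only makes the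
-- recursion total; for 0 ≤ n it never runs out, and for n < 0 the Python loop never terminates
-- (excluded by Pre_).
def aBitsLoop : Nat → Int → List Char → List Char
  | 0, _, m => m
  | fuel + 1, n, m =>
    if n ≠ 0 then
      aBitsLoop fuel (PySem.Int.floordiv n 2) (m ++ (PySem.Int.toStr (PySem.Int.mod n 2)).toList)
    else m

-- one body of `while i > 0`: `m[i], m[i-1] = m[i-1], m[i]` (the indices are always in range
-- when called by binary_no, so the fallthrough branch is never reached there)
def swapStep (m : List Char) (i : Int) : List Char :=
  match PySem.List.pyGet? m i, PySem.List.pyGet? m (i - 1) with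
  | some a, some b => (m.set i.toNat b).set (i - 1).toNat a
  | _, _ => m

-- `i = len(m)-1; while i > 0: …; i -= 2` — fuel m.length + 1 at the call site suffices
def swapLoop : Nat → List Char → Int → List Char
  | 0, m, _ => m
  | fuel + 1, m, i => if 0 < i then swapLoop fuel (swapStep m i) (i - 2) else m

def binary_no (n : Int) : List String :=
  let m0 := aBitsLoop (n.toNat + 1) n []
  -- m[::-1] is List.reverse (PySem.List.slice?_none_none_neg_one); '0'+… prepends one char
  let m1 := if m0.length % 2 == 0 then m0.reverse else '0' :: m0.reverse
  (swapLoop (m1.length + 1) m1 ((m1.length : Int) - 1)).map (fun c => String.ofList [c])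

-- ===== PORT B =====
-- `while n: groups.append([str(n & 1), str((n >> 1) & 1)]); n >>= 2` — same fuel remark as above
def bGroupsLoop : Nat → Int → List (List String) → List (List String)
  | 0, _, groups => groups
  | fuel + 1, n, groups =>
    if n ≠ 0 then
      bGroupsLoop fuel (n >>> (2 : Nat))
        (groups ++ [[PySem.Int.toStr (PySem.Int.band n 1),
                     PySem.Int.toStr (PySem.Int.band (n >>> (1 : Nat)) 1)]])
    else groups

def binary_no_alt (n : Int) : List String :=
  (bGroupsLoop (n.toNat + 1) n []).reverse.flatMap (fun group => group)

-- ===== PRECONDITION & SPEC =====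
-- Pre_ excludes n < 0, where A's `while n: … n >>= 1` never terminates (>> keeps every
-- negative n negative), so A returns on exactly the inputs Pre_ admits.
def Pre_binary_no (n : Int) : Prop := 0 ≤ n
instance (n : Int) : Decidable (Pre_binary_no n) := by unfold Pre_binary_no; infer_instance
def pvWitness_binary_no : Int := (6)

def Spec_binary_no (n : Int) (out : List String) : Prop := out = binary_no_alt n
instance (n : Int) (out : List String) : Decidable (Spec_binary_no n out) := by unfold Spec_binary_no; infer_instance

-- ===== CLAIM (what is proved, stated in full; the proofs are below) =====
def Claim_equal_binary_no : Prop := ∀ (n : Int), Dom_binary_no n → Pre_binary_no n → Spec_binary_no n (binary_no n)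

-- ===== LEMMAS AND PROOFS =====

lemma aBitsLoop_succ (f : Nat) (n : Int) (m : List Char) :
    aBitsLoop (f + 1) n m
      = if n ≠ 0 then
          aBitsLoop f (PySem.Int.floordiv n 2) (m ++ (PySem.Int.toStr (PySem.Int.mod n 2)).toList)
        else m := rfl

lemma bGroupsLoop_succ (f : Nat) (n : Int) (gs : List (List String)) :
    bGroupsLoop (f + 1) n gs
      = if n ≠ 0 then
          bGroupsLoop f (n >>> (2 : Nat))
            (gs ++ [[PySem.Int.toStr (PySem.Int.band n 1),
                     PySem.Int.toStr (PySem.Int.band (n >>> (1 : Nat)) 1)]])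
        else gs := rfl

lemma swapLoop_succ (f : Nat) (m : List Char) (i : Int) :
    swapLoop (f + 1) m i = if 0 < i then swapLoop f (swapStep m i) (i - 2) else m := rfl

-- the digit str(n % 2) is a single character, '0' or '1'
lemma digit_chars (n : Int) :
    (PySem.Int.toStr (PySem.Int.mod n 2)).toList = [if PySem.Int.mod n 2 = 1 then '1' else '0'] := by
  have h0 := PySem.Int.mod_nonneg n (b := 2) (by norm_num)
  have h1 := PySem.Int.mod_lt n (b := 2) (by norm_num)
  have h : PySem.Int.mod n 2 = 0 ∨ PySem.Int.mod n 2 = 1 := by omega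
  rcases h with h | h <;> rw [h] <;> decide

lemma digit_str (n : Int) :
    String.ofList [if PySem.Int.mod n 2 = 1 then '1' else '0'] = PySem.Int.toStr (PySem.Int.mod n 2) := by
  rw [← digit_chars, String.ofList_toList]

lemma aBitsLoop_acc : ∀ (f : Nat) (n : Int) (m : List Char),
    aBitsLoop f n m = m ++ aBitsLoop f n [] := by
  intro f
  induction f with
  | zero => intro n m; simp [aBitsLoop]
  | succ f ih =>
    intro n m
    by_cases hn : n = 0
    · simp [aBitsLoop, hn]
    · simp only [aBitsLoop, if_pos hn]
      rw [ih, ih (m := [] ++ _)]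
      simp

lemma aBitsLoop_fuel : ∀ (f f' : Nat) (n : Int) (m : List Char), 0 ≤ n →
    n.toNat < f → n.toNat < f' → aBitsLoop f n m = aBitsLoop f' n m := by
  intro f
  induction f with
  | zero => intro f' n m _ hf _; omega
  | succ f ih =>
    intro f' n m h0 hf hf'
    cases f' with
    | zero => omega
    | succ f' =>
      by_cases hn : n = 0
      · simp [aBitsLoop, hn]
      · simp only [aBitsLoop, if_pos hn]
        have hd : PySem.Int.floordiv n 2 = n / 2 := PySem.Int.floordiv_eq_ediv_of_pos (by norm_num)
        apply ih
        · rw [hd]; omega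
        · rw [hd]; omega
        · rw [hd]; omega

lemma bGroupsLoop_acc : ∀ (f : Nat) (n : Int) (gs : List (List String)),
    bGroupsLoop f n gs = gs ++ bGroupsLoop f n [] := by
  intro f
  induction f with
  | zero => intro n gs; simp [bGroupsLoop]
  | succ f ih =>
    intro n gs
    by_cases hn : n = 0
    · simp [bGroupsLoop, hn]
    · simp only [bGroupsLoop, if_pos hn]
      rw [ih, ih (gs := [] ++ _)]
      simp

lemma shiftRight_nonneg (n : Int) (h : 0 ≤ n) (k : Nat) :
    n >>> k = PySem.Int.floordiv n (2 ^ k) := by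
  have hpos : (0:Int) < 2 ^ k := by positivity
  rw [PySem.Int.floordiv_eq_ediv_of_pos hpos]
  cases n with
  | ofNat m =>
    show (Int.ofNat (m >>> k)) = _
    rw [Nat.shiftRight_eq_div_pow]
    have h2 : ((m / 2 ^ k : Nat) : Int) = (m : Int) / ((2 ^ k : Nat) : Int) := Int.natCast_div m (2 ^ k)
    simpa using h2
  | negSucc m => exact absurd h (by simp)

lemma bGroupsLoop_fuel : ∀ (f f' : Nat) (n : Int) (gs : List (List String)), 0 ≤ n →
    n.toNat < f → n.toNat < f' → bGroupsLoop f n gs = bGroupsLoop f' n gs := by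
  intro f
  induction f with
  | zero => intro f' n gs _ hf _; omega
  | succ f ih =>
    intro f' n gs h0 hf hf'
    cases f' with
    | zero => omega
    | succ f' =>
      by_cases hn : n = 0
      · simp [bGroupsLoop, hn]
      · simp only [bGroupsLoop, if_pos hn]
        have hd : n >>> (2 : Nat) = n / 4 := by
          rw [shiftRight_nonneg n h0 2, PySem.Int.floordiv_eq_ediv_of_pos (by norm_num)]
          norm_num
        apply ih
        · rw [hd]; omega
        · rw [hd]; omega
        · rw [hd]; omega

lemma swapStep_length (m : List Char) (i : Int) : (swapStep m i).length = m.length := by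
  unfold swapStep
  cases PySem.List.pyGet? m i <;> cases PySem.List.pyGet? m (i - 1) <;> simp

lemma swapStep_eq (m : List Char) (i : Int) (x y : Char)
    (hx : PySem.List.pyGet? m i = some x) (hy : PySem.List.pyGet? m (i - 1) = some y) :
    swapStep m i = (m.set i.toNat y).set (i - 1).toNat x := by
  unfold swapStep
  rw [hx, hy]

lemma swapStep_append (l t : List Char) (i : Int) (h0 : 0 < i) (h1 : i < (l.length : Int)) :
    swapStep (l ++ t) i = swapStep l i ++ t := by
  have hi : PySem.List.pyGet? (l ++ t) i = PySem.List.pyGet? l i := by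
    rw [PySem.List.pyGet?_of_nonneg _ (by omega), PySem.List.pyGet?_of_nonneg _ (by omega),
      List.getElem?_append_left (by omega)]
  have hi1 : PySem.List.pyGet? (l ++ t) (i - 1) = PySem.List.pyGet? l (i - 1) := by
    rw [PySem.List.pyGet?_of_nonneg _ (by omega), PySem.List.pyGet?_of_nonneg _ (by omega),
      List.getElem?_append_left (by omega)]
  unfold swapStep
  rw [hi, hi1]
  cases hg : PySem.List.pyGet? l i <;> cases hg1 : PySem.List.pyGet? l (i - 1) <;> simp
  rw [List.set_append_left _ _ (by omega), List.set_append_left _ _ (by simp; omega)]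

lemma swapLoop_append : ∀ (f : Nat) (l t : List Char) (i : Int), i < (l.length : Int) →
    swapLoop f (l ++ t) i = swapLoop f l i ++ t := by
  intro f
  induction f with
  | zero => intro l t i _; simp [swapLoop]
  | succ f ih =>
    intro l t i h
    by_cases hpos : 0 < i
    · simp only [swapLoop, if_pos hpos]
      rw [swapStep_append l t i hpos h]
      exact ih _ _ _ (by rw [swapStep_length]; omega)
    · simp [swapLoop, hpos]

lemma swapLoop_fuel : ∀ (f f' : Nat) (m : List Char) (i : Int), i.toNat ≤ f → i.toNat ≤ f' →
    swapLoop f m i = swapLoop f' m i := by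
  intro f
  induction f with
  | zero =>
    intro f' m i hf _
    cases f' with
    | zero => rfl
    | succ f' => simp [swapLoop, show ¬ 0 < i by omega]
  | succ f ih =>
    intro f' m i hf hf'
    cases f' with
    | zero => simp [swapLoop, show ¬ 0 < i by omega]
    | succ f' =>
      by_cases hpos : 0 < i
      · simp only [swapLoop, if_pos hpos]
        exact ih _ _ _ (by omega) (by omega)
      · simp [swapLoop, hpos]

lemma swapLoop_pair (f : Nat) (l : List Char) (a b : Char) :
    swapLoop (f + 1) (l ++ [a, b]) ((l.length : Int) + 1)
      = swapLoop f l ((l.length : Int) - 1) ++ [b, a] := by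
  have hpos : (0 : Int) < (l.length : Int) + 1 := by omega
  have hg : PySem.List.pyGet? (l ++ [a, b]) ((l.length : Int) + 1) = some b := by
    have h := PySem.List.pyGet?_append_right l [a, b] 1
    simpa using h
  have hg1 : PySem.List.pyGet? (l ++ [a, b]) ((l.length : Int) + 1 - 1) = some a := by
    have h := PySem.List.pyGet?_append_length l [b] a
    simpa using h
  have ht : ((l.length : Int) + 1).toNat = l.length + 1 := by omega
  have ht1 : ((l.length : Int) + 1 - 1).toNat = l.length := by omega
  rw [swapLoop_succ, if_pos hpos, swapStep_eq _ _ b a hg hg1, ht, ht1]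
  have e1 : (l ++ [a, b]).set (l.length + 1) a = l ++ [a, a] := by
    rw [List.set_append_right _ _ (by omega)]
    simp
  have e2 : (l ++ [a, a]).set l.length b = l ++ [b, a] := by
    rw [List.set_append_right _ _ (le_refl _)]
    simp
  rw [e1, e2]
  have e3 : (l.length : Int) + 1 - 2 = (l.length : Int) - 1 := by ring
  rw [e3]
  exact swapLoop_append f l [b, a] _ (by omega)

-- the shared tail step: swapping the last pair and mapping, for an arbitrary prefix R
lemma swap_map_pair (R : List Char) (c0 c1 : Char) (g : Char → String) :
    (swapLoop ((R ++ [c1, c0]).length + 1) (R ++ [c1, c0]) (((R ++ [c1, c0]).length : Int) - 1)).map g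
      = (swapLoop (R.length + 1) R ((R.length : Int) - 1)).map g ++ [g c0, g c1] := by
  have hfuel : (R ++ [c1, c0]).length + 1 = (R.length + 2) + 1 := by simp
  have hidx : (((R ++ [c1, c0]).length : Int) - 1) = (R.length : Int) + 1 := by
    simp
    omega
  rw [hfuel, hidx, swapLoop_pair (R.length + 2) R c1 c0,
    swapLoop_fuel (R.length + 2) (R.length + 1) R _ (by omega) (by omega), List.map_append]
  rfl

lemma binary_no_rec (n : Int) (h : 0 < n) :
    binary_no n = binary_no (PySem.Int.floordiv n 4)
      ++ [PySem.Int.toStr (PySem.Int.mod n 2),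
          PySem.Int.toStr (PySem.Int.mod (PySem.Int.floordiv n 2) 2)] := by
  by_cases hlt : n < 4
  · interval_cases n <;> decide
  · have hd2 : PySem.Int.floordiv n 2 = n / 2 := PySem.Int.floordiv_eq_ediv_of_pos (by norm_num)
    have hd4 : PySem.Int.floordiv n 4 = n / 4 := PySem.Int.floordiv_eq_ediv_of_pos (by norm_num)
    have hdd : PySem.Int.floordiv (PySem.Int.floordiv n 2) 2 = PySem.Int.floordiv n 4 := by
      rw [hd2, hd4, PySem.Int.floordiv_eq_ediv_of_pos (by norm_num),
        Int.ediv_ediv_of_nonneg (by norm_num)]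
      norm_num
    have hn0 : n ≠ 0 := by omega
    have hn2 : PySem.Int.floordiv n 2 ≠ 0 := by rw [hd2]; omega
    have e1 : n.toNat = (n.toNat - 1) + 1 := by omega
    set c0 := if PySem.Int.mod n 2 = 1 then '1' else '0' with hc0
    set c1 := if PySem.Int.mod (PySem.Int.floordiv n 2) 2 = 1 then '1' else '0' with hc1
    set r := aBitsLoop ((PySem.Int.floordiv n 4).toNat + 1) (PySem.Int.floordiv n 4) [] with hr
    have hb : aBitsLoop (n.toNat + 1) n [] = c0 :: c1 :: r := by
      rw [aBitsLoop_succ, if_pos hn0, e1, aBitsLoop_succ, if_pos hn2, hdd,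
        aBitsLoop_acc (n.toNat - 1),
        aBitsLoop_fuel (n.toNat - 1) ((PySem.Int.floordiv n 4).toNat + 1)
          (PySem.Int.floordiv n 4) [] (by rw [hd4]; omega) (by rw [hd4]; omega) (by omega),
        digit_chars n, digit_chars (PySem.Int.floordiv n 2)]
      rfl
    simp only [binary_no]
    rw [hb]
    by_cases hp : r.length % 2 = 0
    · have hcondn : ((c0 :: c1 :: r).length % 2 == 0) = true := by
        simp
        omega
      have hcondq : (r.length % 2 == 0) = true := by simp [hp]
      rw [if_pos hcondn, if_pos hcondq]
      have hrev : (c0 :: c1 :: r).reverse = r.reverse ++ [c1, c0] := by simp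
      rw [hrev, swap_map_pair r.reverse c0 c1, List.length_reverse]
      rw [digit_str n, digit_str (PySem.Int.floordiv n 2)]
    · have hcondn : ¬ (((c0 :: c1 :: r).length % 2 == 0) = true) := by
        simp
        omega
      have hcondq : ¬ ((r.length % 2 == 0) = true) := by simp [hp]
      rw [if_neg hcondn, if_neg hcondq]
      have hrev : '0' :: (c0 :: c1 :: r).reverse = ('0' :: r.reverse) ++ [c1, c0] := by simp
      rw [hrev, swap_map_pair ('0' :: r.reverse) c0 c1]
      have hlen : ('0' :: r.reverse).length = r.reverse.length + 1 := by simp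
      rw [hlen, List.length_reverse]
      rw [digit_str n, digit_str (PySem.Int.floordiv n 2)]

lemma binary_no_alt_rec (n : Int) (h : 0 < n) :
    binary_no_alt n = binary_no_alt (PySem.Int.floordiv n 4)
      ++ [PySem.Int.toStr (PySem.Int.mod n 2),
          PySem.Int.toStr (PySem.Int.mod (PySem.Int.floordiv n 2) 2)] := by
  have hd4 : PySem.Int.floordiv n 4 = n / 4 := PySem.Int.floordiv_eq_ediv_of_pos (by norm_num)
  have hs2 : n >>> (2 : Nat) = PySem.Int.floordiv n 4 := by
    rw [shiftRight_nonneg n (by omega) 2]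
    norm_num
  have hs1 : n >>> (1 : Nat) = PySem.Int.floordiv n 2 := by
    rw [shiftRight_nonneg n (by omega) 1]
    norm_num
  have hn0 : n ≠ 0 := by omega
  unfold binary_no_alt
  rw [bGroupsLoop_succ, if_pos hn0,
    bGroupsLoop_acc n.toNat, hs2, hs1,
    bGroupsLoop_fuel n.toNat ((PySem.Int.floordiv n 4).toNat + 1)
      (PySem.Int.floordiv n 4) [] (by rw [hd4]; omega) (by rw [hd4]; omega) (by omega),
    PySem.Int.band_one, PySem.Int.band_one]
  simp

-- ===== VERDICT (by name: the statement is the Claim_ definition above) =====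
theorem binary_no_spec : Claim_equal_binary_no := by
  unfold Claim_equal_binary_no
  intro n _ hpre
  unfold Spec_binary_no
  unfold Pre_binary_no at hpre
  have main : ∀ (k : Nat) (n : Int), 0 ≤ n → n.toNat = k → binary_no n = binary_no_alt n := by
    intro k
    induction k using Nat.strong_induction_on with
    | _ k ih =>
      intro n hn hk
      by_cases h0 : n = 0
      · subst h0; decide
      · have hpos : 0 < n := by omega
        rw [binary_no_rec n hpos, binary_no_alt_rec n hpos]
        have hq : PySem.Int.floordiv n 4 = n / 4 := PySem.Int.floordiv_eq_ediv_of_pos (by norm_num)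
        have heq := ih (PySem.Int.floordiv n 4).toNat (by rw [hq]; omega)
          (PySem.Int.floordiv n 4) (by rw [hq]; omega) rfl
        rw [heq]
  exact main n.toNat n hpre rfl
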